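-- pv_equiv track=rewrite | github.com/cheonjiwan/Algorithm | 구현/문자열압축.py | solution
-- ===== SOURCE A (Python) =====
-- def solution(s):
--     answer = len(s)
--
--     for i in range(1, len(s) // 2 + 1):
--         mystr = ""
--         prev = s[:i]
--         count = 1
--         for j in range(i, len(s), i):
--             if prev == s[j : j + i]:
--                 count += 1
--             else:
--                 mystr += str(count) + prev if count >= 2 else prev
--                 prev = s[j : j + i]
--                 count = 1
--         mystr += str(count) + prev if count >= 2 else prev
--         answer = min(answer, len(mystr))
--
--     return answer
-- ===== SOURCE B (Python) =====
-- def solution(s):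
--     n = len(s)
--     best = n
--     for i in range(1, n // 2 + 1):
--         # P[k] = number of positions k' < k with s[k'] == s[k' + i]
--         P = [0]
--         for k in range(n):
--             P.append(P[-1] + (1 if k + i < n and s[k] == s[k + i] else 0))
--         total = 0
--         count = 1
--         for j in range(i, n, i):
--             # chunk s[j:j+i] equals the previous chunk s[j-i:j] iff it is full
--             # length and every character matches its partner i places back
--             if j + i <= n and P[j] - P[j - i] == i:
--                 count += 1
--             else:
--                 total += i + (len(str(count)) if count >= 2 else 0)
--                 count = 1
--         last = i * ((n - 1) // i)
--         total += (n - last) + (len(str(count)) if count >= 2 else 0)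
--         best = min(best, total)
--     return best
-- ===== Notes on version B (the rewrite author's own statement) =====
-- stated objective: alternative
-- what changed: A compares substring chunks by slicing and builds each compressed string to measure its length; B never slices or builds strings: per unit size it precomputes a prefix-sum table of character matches at distance i, decides run continuation by a constant-time window test on that table, and accumulates the compressed length numerically.
import Mathlib
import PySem

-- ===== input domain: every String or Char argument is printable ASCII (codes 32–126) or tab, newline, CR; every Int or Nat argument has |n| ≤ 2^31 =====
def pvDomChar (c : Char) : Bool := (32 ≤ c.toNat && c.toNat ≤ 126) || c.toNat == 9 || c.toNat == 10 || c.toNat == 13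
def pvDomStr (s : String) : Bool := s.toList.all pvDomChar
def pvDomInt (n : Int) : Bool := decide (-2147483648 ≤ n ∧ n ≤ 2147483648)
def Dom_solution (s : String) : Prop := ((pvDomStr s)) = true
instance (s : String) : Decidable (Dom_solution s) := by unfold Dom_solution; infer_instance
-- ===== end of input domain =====

-- B replaces A's per-unit substring slicing and compressed-string building by a
-- prefix-sum table of character matches at distance i (chunk equality becomes a
-- constant-time window test) and a numeric length accumulator (objective: alternative).

-- ===== PORT A =====
def solution (s : String) : Int :=
  let cs := s.toList
  let answer : Int := PySem.Str.len s
  (PySem.List.pyRange 1 (PySem.Int.floordiv (PySem.Str.len s) 2 + 1) 1).foldl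
    (fun answer i =>
      -- state (mystr, prev, count); for j in range(i, len(s), i)
      let st :=
        (PySem.List.pyRange i (PySem.Str.len s) i).foldl
          (fun (st : List Char × List Char × Int) j =>
            if st.2.1 == PySem.List.slice cs (some j) (some (j + i)) then
              (st.1, st.2.1, st.2.2 + 1)
            else
              (st.1 ++ (if st.2.2 ≥ 2 then PySem.Int.toChars st.2.2 ++ st.2.1 else st.2.1),
               PySem.List.slice cs (some j) (some (j + i)), 1))
          ([], PySem.List.slice cs none (some i), 1)
      let mystr := st.1 ++ (if st.2.2 ≥ 2 then PySem.Int.toChars st.2.2 ++ st.2.1 else st.2.1)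
      min answer (mystr.length : Int))
    answer

-- ===== PORT B =====
def solution_alt (s : String) : Int :=
  let cs := s.toList
  let n : Int := PySem.Str.len s
  (PySem.List.pyRange 1 (PySem.Int.floordiv n 2 + 1) 1).foldl
    (fun best i =>
      -- P[k] = number of positions k' < k with s[k'] == s[k' + i]
      let P : List Int :=
        (PySem.List.pyRange 0 n 1).foldl
          (fun P k =>
            P ++ [PySem.List.pyGetD P (-1) 0 +
              (if k + i < n ∧ PySem.List.pyGet? cs k = PySem.List.pyGet? cs (k + i) then 1 else 0)])
          [0]
      -- state (total, count); chunk at j equals chunk at j-i iff it is full length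
      -- and all i characters match their partner i places back
      let st :=
        (PySem.List.pyRange i n i).foldl
          (fun (st : Int × Int) j =>
            if j + i ≤ n ∧ PySem.List.pyGetD P j 0 - PySem.List.pyGetD P (j - i) 0 = i then
              (st.1, st.2 + 1)
            else
              (st.1 + i + (if st.2 ≥ 2 then ((PySem.Int.toChars st.2).length : Int) else 0), 1))
          (0, 1)
      let last := i * PySem.Int.floordiv (n - 1) i
      let total := st.1 + (n - last) + (if st.2 ≥ 2 then ((PySem.Int.toChars st.2).length : Int) else 0)
      min best total)
    n

-- ===== PRECONDITION & SPEC =====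
def Spec_solution (s : String) (out : Int) : Prop := out = solution_alt s
instance (s : String) (out : Int) : Decidable (Spec_solution s out) := by unfold Spec_solution; infer_instance

-- ===== CLAIM (what is proved, stated in full; the proofs are below) =====
def Claim_equal_solution : Prop := ∀ (s : String), Dom_solution s → Spec_solution s (solution s)

-- ===== LEMMAS AND PROOFS =====

-- digit-length contribution of a run count
def pvDig (c : Int) : Int := if c ≥ 2 then ((PySem.Int.toChars c).length : Int) else 0

-- length contribution of one run (chunk, count) to the compressed string
def pvContrib (r : List Char × Int) : Int := (r.1.length : Int) + pvDig r.2

-- compressed length of the run starting at (prev, count) followed by chunks L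
def pvLenA (prev : List Char) (count : Int) : List (List Char) → Int
  | [] => pvContrib (prev, count)
  | ch :: L => if prev == ch then pvLenA prev (count + 1) L
               else pvContrib (prev, count) + pvLenA ch 1 L

def pvStepA (st : List Char × List Char × Int) (ch : List Char) : List Char × List Char × Int :=
  if st.2.1 == ch then (st.1, st.2.1, st.2.2 + 1)
  else (st.1 ++ (if st.2.2 ≥ 2 then PySem.Int.toChars st.2.2 ++ st.2.1 else st.2.1), ch, 1)

def pvFinal (st : List Char × List Char × Int) : Int :=
  ((st.1 ++ (if st.2.2 ≥ 2 then PySem.Int.toChars st.2.2 ++ st.2.1 else st.2.1)).length : Int)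

lemma pvA_len (L : List (List Char)) : ∀ (mystr prev : List Char) (count : Int),
    pvFinal (L.foldl pvStepA (mystr, prev, count)) = (mystr.length : Int) + pvLenA prev count L := by
  induction L with
  | nil =>
    intro mystr prev count
    by_cases hc : count ≥ 2
    · simp [pvFinal, pvLenA, pvContrib, pvDig, hc, List.length_append]; ring
    · simp [pvFinal, pvLenA, pvContrib, pvDig, hc, List.length_append]
  | cons ch L ih =>
    intro mystr prev count
    simp only [List.foldl_cons, pvStepA]
    by_cases h : (prev == ch) = true
    · rw [if_pos h, ih]
      have hl : pvLenA prev count (ch :: L) = pvLenA prev (count + 1) L := by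
        simp [pvLenA, h]
      rw [hl]
    · rw [if_neg h, ih]
      have hl : pvLenA prev count (ch :: L) = pvContrib (prev, count) + pvLenA ch 1 L := by
        simp [pvLenA, h]
      rw [hl]
      by_cases hc : count ≥ 2
      · simp [pvContrib, pvDig, hc, List.length_append]; ring
      · simp [pvContrib, pvDig, hc, List.length_append]; ring

-- B-side: the match predicate at distance i, its prefix counts, and the built table
def pvP (cs : List Char) (i : Int) (k : ℕ) : Bool :=
  decide ((k : ℤ) + i < (cs.length : ℤ) ∧
    PySem.List.pyGet? cs (k : ℤ) = PySem.List.pyGet? cs ((k : ℤ) + i))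

def pvM (cs : List Char) (i : Int) (k : ℕ) : Int := ((List.range k).countP (pvP cs i) : ℤ)

def pvPList (cs : List Char) (i : Int) : List Int := (List.range (cs.length + 1)).map (pvM cs i)

lemma pvM_succ (cs : List Char) (i : Int) (k : ℕ) :
    pvM cs i (k + 1) = pvM cs i k +
      (if (k : ℤ) + i < (cs.length : ℤ) ∧
          PySem.List.pyGet? cs (k : ℤ) = PySem.List.pyGet? cs ((k : ℤ) + i) then 1 else 0) := by
  simp only [pvM, List.range_succ, List.countP_append, List.countP_cons, List.countP_nil, pvP]
  push_cast
  split_ifs with h h2 h2 <;> simp_all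

lemma pvP_build (cs : List Char) (i : Int) :
    (PySem.List.pyRange 0 (cs.length : ℤ) 1).foldl
      (fun P k =>
        P ++ [PySem.List.pyGetD P (-1) 0 +
          (if k + i < (cs.length : ℤ) ∧
              PySem.List.pyGet? cs k = PySem.List.pyGet? cs (k + i) then 1 else 0)])
      [0] = pvPList cs i := by
  rw [PySem.List.pyRange_zero_natCast, List.foldl_map]
  suffices h : ∀ m : ℕ, (List.range m).foldl
      (fun P (k : ℕ) =>
        P ++ [PySem.List.pyGetD P (-1) 0 +
          (if (k : ℤ) + i < (cs.length : ℤ) ∧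
              PySem.List.pyGet? cs (k : ℤ) = PySem.List.pyGet? cs ((k : ℤ) + i) then 1 else 0)])
      [0] = (List.range (m + 1)).map (pvM cs i) by
    exact h cs.length
  intro m
  induction m with
  | zero => simp [pvM]
  | succ m ih =>
    rw [List.range_succ, List.foldl_append, ih, List.foldl_cons, List.foldl_nil,
        List.range_succ (n := m + 1), List.map_append]
    rw [show (List.range (m + 1)).map (pvM cs i)
          = (List.range m).map (pvM cs i) ++ [pvM cs i m] by
        rw [List.range_succ, List.map_append, List.map_singleton]]
    rw [PySem.List.pyGetD_neg_one_append_singleton]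
    simp [pvM_succ]

lemma pvP_get (cs : List Char) (i : Int) (j : ℤ) (h0 : 0 ≤ j) (hn : j ≤ (cs.length : ℤ)) :
    PySem.List.pyGetD (pvPList cs i) j 0 = pvM cs i j.toNat := by
  have hj : j = ((j.toNat : ℕ) : ℤ) := by omega
  rw [hj, PySem.List.pyGetD_natCast, pvPList]
  exact PySem.List.getD_map_range _ _ _ _ (by omega)

-- chunk equality ⟺ the window test on prefix counts
lemma pvM_window (cs : List Char) (i : Int) (a d : ℕ) :
    pvM cs i (a + d) - pvM cs i a = (((List.range d).map (a + ·)).countP (pvP cs i) : ℤ) := by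
  simp [pvM, List.range_add, List.countP_append]

lemma pvCond (cs : List Char) (i j : ℤ) (hi : 1 ≤ i) (hij : i ≤ j) (hjn : j < (cs.length : ℤ)) :
    (j + i ≤ (cs.length : ℤ) ∧ pvM cs i j.toNat - pvM cs i (j - i).toNat = i)
      ↔ PySem.List.slice cs (some (j - i)) (some j)
          = PySem.List.slice cs (some j) (some (j + i)) := by
  set n := cs.length with hn
  set a := (j - i).toNat with ha
  set d := i.toNat with hd
  have hja : j.toNat = a + d := by omega
  have hji : (j + i).toNat = a + d + d := by omega
  have h1 : PySem.List.slice cs (some (j - i)) (some j)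
      = List.take d (List.drop a cs) := by
    rw [PySem.List.slice_toNat cs (by omega) (by omega), hja]
    congr 1; omega
  have h2 : PySem.List.slice cs (some j) (some (j + i))
      = List.take d (List.drop (a + d) cs) := by
    rw [PySem.List.slice_toNat cs (by omega) (by omega), hja, hji]
    congr 1; omega
  have hadn : a + d < n := by omega
  have hcnt : pvM cs i j.toNat - pvM cs i a
      = (((List.range d).map (a + ·)).countP (pvP cs i) : ℤ) := by
    rw [hja, pvM_window]
  have hcntle : ((List.range d).map (a + ·)).countP (pvP cs i) ≤ d := by
    calc ((List.range d).map (a + ·)).countP (pvP cs i)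
        ≤ ((List.range d).map (a + ·)).length := List.countP_le_length
      _ = d := by simp
  constructor
  · rintro ⟨hin, hsum⟩
    have hall : ∀ x ∈ (List.range d).map (a + ·), pvP cs i x = true := by
      apply List.countP_eq_length.mp
      rw [hcnt] at hsum
      have hcd : ((List.range d).map (a + ·)).countP (pvP cs i) = d := by omega
      rw [hcd]; simp
    rw [h1, h2]
    apply List.ext_getElem
    · simp; omega
    · intro t ht1 ht2
      simp only [List.getElem_take, List.getElem_drop]
      have hp := hall ((a + t)) (by
        simp only [List.mem_map, List.mem_range]
        exact ⟨t, by simp at ht1; omega, rfl⟩)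
      simp only [pvP, decide_eq_true_eq] at hp
      have hget := hp.2
      have hlt1 : a + t < n := by omega
      have hlt2 : a + d + t < n := by
        have : (↑(a + t) : ℤ) + i < (n : ℤ) := hp.1
        omega
      rw [show ((a + t : ℕ) : ℤ) + i = ((a + d + t : ℕ) : ℤ) by push_cast; omega] at hget
      rw [PySem.List.pyGet?_natCast, PySem.List.pyGet?_natCast] at hget
      rw [List.getElem?_eq_getElem hlt1, List.getElem?_eq_getElem hlt2] at hget
      simpa using hget
  · intro heq
    rw [h1, h2] at heq
    have hlen := congrArg List.length heq
    simp only [List.length_take, List.length_drop] at hlen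
    have hd1 : min d (n - a) = d := by omega
    have hin : a + d + d ≤ n := by omega
    have hiZ : j + i ≤ (n : ℤ) := by omega
    refine ⟨hiZ, ?_⟩
    rw [hcnt]
    have hall : ∀ x ∈ (List.range d).map (a + ·), pvP cs i x = true := by
      intro x hx
      simp only [List.mem_map, List.mem_range] at hx
      obtain ⟨t, ht, rfl⟩ := hx
      simp only [pvP, decide_eq_true_eq]
      constructor
      · push_cast; omega
      · have : (List.take d (List.drop a cs))[t]'(by simp; omega)
            = (List.take d (List.drop (a + d) cs))[t]'(by simp; omega) := by
          congr 1
        simp only [List.getElem_take, List.getElem_drop] at this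
        rw [show ((a + t : ℕ) : ℤ) + i = ((a + d + t : ℕ) : ℤ) by push_cast; omega]
        rw [PySem.List.pyGet?_natCast, PySem.List.pyGet?_natCast,
            List.getElem?_eq_getElem (by omega), List.getElem?_eq_getElem (by omega)]
        simpa using this
    rw [List.countP_eq_length.mpr hall]
    simp
    omega

lemma pvRange_pos_cons (a b s : Int) (hs : 0 < s) (hab : a < b) :
    PySem.List.pyRange a b s = a :: PySem.List.pyRange (a + s) b s := by
  rw [PySem.List.pyRange_of_pos _ _ hs, PySem.List.pyRange_of_pos _ _ hs, if_pos hab]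
  have h1 : b - a + s - 1 = (b - a - 1) + 1 * s := by ring
  rw [h1, Int.add_mul_ediv_right _ _ (by omega)]
  have hge : 0 ≤ (b - a - 1) / s := Int.ediv_nonneg (by omega) (by omega)
  have htn : ((b - a - 1) / s + 1).toNat = ((b - a - 1) / s).toNat + 1 := by omega
  have hcount : (if a + s < b then ((b - (a + s) + s - 1) / s).toNat else 0)
      = ((b - a - 1) / s).toNat := by
    by_cases h2 : a + s < b
    · rw [if_pos h2, show b - (a + s) + s - 1 = b - a - 1 from by ring]
    · rw [if_neg h2]
      have hz : (b - a - 1) / s = 0 := Int.ediv_eq_zero_of_lt (by omega) (by omega)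
      omega
  rw [htn, hcount, List.range_succ_eq_map, List.map_cons, List.map_map]
  refine congrArg₂ _ (by push_cast; ring) ?_
  apply List.map_congr_left
  intro k _
  simp only [Function.comp_apply]
  push_cast
  ring

def pvStepB (cs : List Char) (i : Int) (st : Int × Int) (j : Int) : Int × Int :=
  if j + i ≤ (cs.length : ℤ) ∧ pvM cs i j.toNat - pvM cs i (j - i).toNat = i then
    (st.1, st.2 + 1)
  else (st.1 + i + pvDig st.2, 1)

lemma pvRange_pos_nil (a b s : Int) (hs : 0 < s) (hab : b ≤ a) :
    PySem.List.pyRange a b s = [] := by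
  rw [PySem.List.pyRange_of_pos _ _ hs, if_neg (by omega)]
  simp

lemma pvSliceLen (cs : List Char) (a b : ℤ) (h0 : 0 ≤ a) (hab : a ≤ b) (hb : a ≤ (cs.length : ℤ)) :
    ((PySem.List.slice cs (some a) (some b)).length : ℤ) = min b (cs.length : ℤ) - a := by
  rw [PySem.List.slice_toNat cs h0 (by omega)]
  simp only [List.length_take, List.length_drop]
  omega

-- B's loop computes the same run-length total as pvLenA over the chunk list
lemma pvB_main (cs : List Char) (i : Int) (hi : 1 ≤ i) :
    ∀ (m : ℕ) (j t c : Int), ((cs.length : ℤ) - j).toNat ≤ m → i ≤ j → i ∣ j →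
      j - i < (cs.length : ℤ) →
      (((PySem.List.pyRange j (cs.length : ℤ) i).foldl (pvStepB cs i) (t, c)).1 +
          ((cs.length : ℤ) - i * PySem.Int.floordiv ((cs.length : ℤ) - 1) i) +
          pvDig ((PySem.List.pyRange j (cs.length : ℤ) i).foldl (pvStepB cs i) (t, c)).2)
        = t + pvLenA (PySem.List.slice cs (some (j - i)) (some j)) c
            ((PySem.List.pyRange j (cs.length : ℤ) i).map
              (fun j' => PySem.List.slice cs (some j') (some (j' + i)))) := by
  intro m
  induction m with
  | zero =>
    intro j t c hm hij hdvd hjin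
    have hnj : (cs.length : ℤ) ≤ j := by omega
    rw [pvRange_pos_nil _ _ _ (by omega) hnj]
    simp only [List.foldl_nil, List.map_nil, pvLenA, pvContrib]
    obtain ⟨q, rfl⟩ := hdvd
    have hfd : PySem.Int.floordiv ((cs.length : ℤ) - 1) i = q - 1 := by
      rw [PySem.Int.floordiv_eq_iff_of_pos (by omega)]
      constructor <;> nlinarith [hi]
    rw [hfd, pvSliceLen cs _ _ (by omega) (by omega) (by omega)]
    have : min (i * q) (cs.length : ℤ) = (cs.length : ℤ) := by omega
    rw [this]
    ring
  | succ m ih =>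
    intro j t c hm hij hdvd hjin
    by_cases hnj : (cs.length : ℤ) ≤ j
    · -- same as the base case
      rw [pvRange_pos_nil _ _ _ (by omega) hnj]
      simp only [List.foldl_nil, List.map_nil, pvLenA, pvContrib]
      obtain ⟨q, rfl⟩ := hdvd
      have hfd : PySem.Int.floordiv ((cs.length : ℤ) - 1) i = q - 1 := by
        rw [PySem.Int.floordiv_eq_iff_of_pos (by omega)]
        constructor <;> nlinarith [hi]
      rw [hfd, pvSliceLen cs _ _ (by omega) (by omega) (by omega)]
      have : min (i * q) (cs.length : ℤ) = (cs.length : ℤ) := by omega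
      rw [this]
      ring
    · have hjn : j < (cs.length : ℤ) := by omega
      rw [pvRange_pos_cons _ _ _ (by omega) hjn]
      simp only [List.foldl_cons, List.map_cons]
      by_cases hC : (j + i ≤ (cs.length : ℤ) ∧ pvM cs i j.toNat - pvM cs i (j - i).toNat = i)
      · have heq := (pvCond cs i j hi hij hjn).mp hC
        have hbeq : (PySem.List.slice cs (some (j - i)) (some j)
            == PySem.List.slice cs (some j) (some (j + i))) = true := by
          exact beq_iff_eq.mpr heq
        rw [show pvStepB cs i (t, c) j = (t, c + 1) by simp [pvStepB, hC]]
        rw [show pvLenA (PySem.List.slice cs (some (j - i)) (some j)) c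
              (PySem.List.slice cs (some j) (some (j + i)) ::
                (PySem.List.pyRange (j + i) (cs.length : ℤ) i).map
                  (fun j' => PySem.List.slice cs (some j') (some (j' + i))))
            = pvLenA (PySem.List.slice cs (some (j - i)) (some j)) (c + 1)
              ((PySem.List.pyRange (j + i) (cs.length : ℤ) i).map
                  (fun j' => PySem.List.slice cs (some j') (some (j' + i)))) by
          simp [pvLenA, hbeq]]
        rw [heq, show j = (j + i) - i by ring]
        have := ih (j + i) t (c + 1) (by omega) (by omega)
          (by exact Dvd.dvd.add hdvd (dvd_refl i)) (by omega)
        rw [show j + i - i = j by ring] at this ⊢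
        exact this
      · have hneq : PySem.List.slice cs (some (j - i)) (some j)
            ≠ PySem.List.slice cs (some j) (some (j + i)) := by
          intro h; exact hC ((pvCond cs i j hi hij hjn).mpr h)
        have hbeq : (PySem.List.slice cs (some (j - i)) (some j)
            == PySem.List.slice cs (some j) (some (j + i))) = false := by
          simpa using hneq
        rw [show pvStepB cs i (t, c) j = (t + i + pvDig c, 1) by simp [pvStepB, hC]]
        rw [show pvLenA (PySem.List.slice cs (some (j - i)) (some j)) c
              (PySem.List.slice cs (some j) (some (j + i)) ::
                (PySem.List.pyRange (j + i) (cs.length : ℤ) i).map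
                  (fun j' => PySem.List.slice cs (some j') (some (j' + i))))
            = pvContrib (PySem.List.slice cs (some (j - i)) (some j), c) +
              pvLenA (PySem.List.slice cs (some j) (some (j + i))) 1
                ((PySem.List.pyRange (j + i) (cs.length : ℤ) i).map
                  (fun j' => PySem.List.slice cs (some j') (some (j' + i)))) by
          simp [pvLenA, hbeq]]
        have hlen : ((PySem.List.slice cs (some (j - i)) (some j)).length : ℤ) = i := by
          rw [pvSliceLen cs _ _ (by omega) (by omega) (by omega)]
          omega
        have := ih (j + i) (t + i + pvDig c) 1 (by omega) (by omega)
          (by exact Dvd.dvd.add hdvd (dvd_refl i)) (by omega)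
        rw [show j + i - i = j by ring] at this
        rw [this, pvContrib, hlen]
        ring

-- ===== VERDICT (by name: the statement is the Claim_ definition above) =====
theorem solution_spec : Claim_equal_solution := by
  intro s _
  unfold Spec_solution
  have hlen : PySem.Str.len s = ((s.toList.length : ℕ) : ℤ) := by
    simp [PySem.Str.len_eq]
  simp only [solution, solution_alt, hlen]
  apply PySem.List.foldl_congr_mem
  intro acc i hi
  rw [PySem.List.mem_pyRange_one] at hi
  obtain ⟨hi1, hi2⟩ := hi
  have hile : i ≤ PySem.Int.floordiv (↑s.toList.length) 2 := by omega
  have h2i : i * 2 ≤ (s.toList.length : ℤ) :=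
    (PySem.Int.le_floordiv_iff_mul_le (by norm_num)).mp hile
  congr 1
  -- A's inner value via pvA_len
  have hA : pvFinal ((PySem.List.pyRange i (s.toList.length : ℤ) i).foldl
        (fun st j => pvStepA st (PySem.List.slice s.toList (some j) (some (j + i))))
        ([], PySem.List.slice s.toList none (some i), 1))
      = pvLenA (PySem.List.slice s.toList none (some i)) 1
          ((PySem.List.pyRange i (s.toList.length : ℤ) i).map
            (fun j => PySem.List.slice s.toList (some j) (some (j + i)))) := by
    rw [← List.foldl_map
      (f := fun j => PySem.List.slice s.toList (some j) (some (j + i))) (g := pvStepA),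
      pvA_len]
    simp
  -- B's table is the prefix-count list
  simp only [pvP_build]
  -- B's inner loop is pvStepB
  have hcongr : (PySem.List.pyRange i (s.toList.length : ℤ) i).foldl
      (fun (st : Int × Int) j =>
        if j + i ≤ (s.toList.length : ℤ) ∧
            PySem.List.pyGetD (pvPList s.toList i) j 0 -
              PySem.List.pyGetD (pvPList s.toList i) (j - i) 0 = i then
          (st.1, st.2 + 1)
        else (st.1 + i + (if st.2 ≥ 2 then ((PySem.Int.toChars st.2).length : Int) else 0), 1))
      (0, 1)
      = (PySem.List.pyRange i (s.toList.length : ℤ) i).foldl (pvStepB s.toList i) (0, 1) := by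
    apply PySem.List.foldl_congr_mem
    intro st j hj
    rw [PySem.List.mem_pyRange_iff_of_pos (by omega)] at hj
    obtain ⟨hj1, hj2, hj3⟩ := hj
    rw [pvP_get s.toList i j (by omega) (by omega),
        pvP_get s.toList i (j - i) (by omega) (by omega)]
    simp [pvStepB, pvDig]
  rw [hcongr]
  have hB := pvB_main s.toList i hi1 (((s.toList.length : ℤ) - i).toNat) i 0 1
    (by omega) (le_refl i) (dvd_refl i) (by omega)
  rw [show i - i = 0 from by ring] at hB
  simp only [PySem.List.slice_zero_start] at hB
  simp only [pvFinal, pvStepA] at hA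
  simp only [pvDig] at hB
  rw [hA, hB]
  ring
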